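-- pv_equiv track=rewrite | github.com/DeepBxM/FastSAM3D-CVPR2025 | renew_json.py | extract_top_key
-- ===== SOURCE A (Python) =====
-- def extract_top_key(filename):
--     """
--     从 nii.gz 文件名中提取顶层键。
--     保留从左向右检测的第三个 "_" 之前的内容作为顶层键名。
--     """
--     # 去除尾部扩展名
--     if filename.endswith('_label.nii.gz'):
--         base = filename[:-len('_label.nii.gz')]
--     elif filename.endswith('.nii.gz'):
--         base = filename[:-len('.nii.gz')]
--     else:
--         base = filename
--
--     # 找到第三个 "_" 的位置
--     underscore_indices = [i for i, char in enumerate(base) if char == '_']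
--     if len(underscore_indices) >= 3:
--         # 保留第三个 "_" 之前的内容
--         top_key = base[:underscore_indices[2]]
--     else:
--         # 如果不足三个 "_"，则返回整个字符串
--         top_key = base
--
--     return top_key
-- ===== SOURCE B (Python) =====
-- def extract_top_key(filename):
--     # Same suffix-stripping guard chain as A; the core replaces A's
--     # index-collecting comprehension + slice with bounded tokenization.
--     if filename.endswith('_label.nii.gz'):
--         base = filename[:-len('_label.nii.gz')]
--     elif filename.endswith('.nii.gz'):
--         base = filename[:-len('.nii.gz')]
--     else:
--         base = filename
--     parts = base.split('_', 3)
--     return '_'.join(parts[:3])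
-- ===== Notes on version B (the rewrite author's own statement) =====
-- stated objective: idiomatic
-- what changed: The core no longer enumerates every character to collect the full list of underscore indices and then slice at the third; it tokenizes with base.split('_', 3) and rejoins the first three tokens.
import Mathlib
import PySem

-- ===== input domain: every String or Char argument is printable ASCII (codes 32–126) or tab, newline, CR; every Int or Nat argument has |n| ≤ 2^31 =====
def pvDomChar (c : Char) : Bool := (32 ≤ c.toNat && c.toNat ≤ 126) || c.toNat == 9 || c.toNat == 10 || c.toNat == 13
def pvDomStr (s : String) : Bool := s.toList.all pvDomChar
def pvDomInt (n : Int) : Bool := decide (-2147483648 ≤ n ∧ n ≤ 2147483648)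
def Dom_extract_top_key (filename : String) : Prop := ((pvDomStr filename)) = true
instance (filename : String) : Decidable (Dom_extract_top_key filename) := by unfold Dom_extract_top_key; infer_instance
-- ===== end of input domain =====

-- B replaces A's enumerate-collect-indices-and-slice core by split('_', 3) + join of the
-- first three tokens (idiomatic tokenization); the suffix-stripping guard chain is unchanged.


-- ===== PORT A =====
def extract_top_key (filename : String) : String :=
  -- strip trailing extension
  let base :=
    if PySem.Str.endswith filename "_label.nii.gz" then
      PySem.Str.slice filename none (some (-13))       -- filename[:-len('_label.nii.gz')]
    else if PySem.Str.endswith filename ".nii.gz" then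
      PySem.Str.slice filename none (some (-7))        -- filename[:-len('.nii.gz')]
    else filename
  -- underscore_indices = [i for i, char in enumerate(base) if char == '_']
  let underscore_indices :=
    ((PySem.List.enumerate base.toList 0).filter (fun p => p.2 == '_')).map Prod.fst
  if 3 ≤ underscore_indices.length then
    -- base[:underscore_indices[2]]  (index 2 is in range under the guard)
    PySem.Str.slice base none (some (PySem.List.pyGetD underscore_indices 2 0))
  else base

-- ===== PORT B =====
def extract_top_key_alt (filename : String) : String :=
  let base :=
    if PySem.Str.endswith filename "_label.nii.gz" then
      PySem.Str.slice filename none (some (-13))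
    else if PySem.Str.endswith filename ".nii.gz" then
      PySem.Str.slice filename none (some (-7))
    else filename
  -- parts = base.split('_', 3); return '_'.join(parts[:3])
  match PySem.Str.splitMax? base "_" 3 with
  | some parts => PySem.Str.join "_" (PySem.List.slice parts none (some 3))
  | none => ""   -- unreachable: the separator "_" is nonempty

-- ===== PRECONDITION & SPEC =====
def Spec_extract_top_key (filename : String) (out : String) : Prop := out = extract_top_key_alt filename
instance (filename : String) (out : String) : Decidable (Spec_extract_top_key filename out) := by unfold Spec_extract_top_key; infer_instance

-- ===== CLAIM (what is proved, stated in full; the proofs are below) =====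
def Claim_equal_extract_top_key : Prop := ∀ (filename : String), Dom_extract_top_key filename → Spec_extract_top_key filename (extract_top_key filename)

-- ===== LEMMAS AND PROOFS =====

-- positions (as Nats) of '_' in a char list
def upos : List Char → List Nat
  | [] => []
  | c :: r => if c = '_' then 0 :: (upos r).map (· + 1) else (upos r).map (· + 1)

-- the comprehension's value, structurally
def uidx : List Char → Int → List Int
  | [], _ => []
  | c :: r, s => if c = '_' then s :: uidx r (s + 1) else uidx r (s + 1)

-- reference form of PySem.Chars.splitOnMax.go with sep = ['_'] (fuel removed)
def res : Nat → List Char → List Char → List (List Char)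
  | _, [], cur => [cur.reverse]
  | m, c :: rest, cur =>
    if m = 0 then [cur.reverse ++ (c :: rest)]
    else if c = '_' then cur.reverse :: res (m - 1) rest []
    else res m rest (c :: cur)

theorem uidx_eq_enum (l : List Char) (s : Int) :
    ((PySem.List.enumerate l s).filter (fun p => p.2 == '_')).map Prod.fst = uidx l s := by
  induction l generalizing s with
  | nil => simp [uidx, PySem.List.enumerate_nil]
  | cons c r ih =>
    simp only [PySem.List.enumerate_cons, List.filter_cons, uidx]
    by_cases h : c = '_' <;> simp [h, ih]

theorem uidx_eq_upos (l : List Char) (s : Int) :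
    uidx l s = (upos l).map (fun n : Nat => s + (n : Int)) := by
  induction l generalizing s with
  | nil => simp [uidx, upos]
  | cons c r ih =>
    by_cases h : c = '_'
    · simp only [uidx, upos, if_pos h, List.map_cons, List.map_map]
      rw [ih]
      congr 1
      · simp
      · exact List.map_congr_left (fun n _ => by
          show (s + 1) + (n : Int) = s + ((n + 1 : Nat) : Int)
          push_cast; ring)
    · simp only [uidx, upos, if_neg h, List.map_map]
      rw [ih]
      exact List.map_congr_left (fun n _ => by
        show (s + 1) + (n : Int) = s + ((n + 1 : Nat) : Int)
        push_cast; ring)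

theorem idx_list (l : List Char) :
    ((PySem.List.enumerate l 0).filter (fun p => p.2 == '_')).map Prod.fst
      = (upos l).map (fun n : Nat => (n : Int)) := by
  rw [uidx_eq_enum, uidx_eq_upos]
  exact List.map_congr_left (fun n _ => zero_add _)

theorem res_ne_nil (m : Nat) (l cur : List Char) : res m l cur ≠ [] := by
  induction l generalizing m cur with
  | nil => simp [res]
  | cons c rest ih =>
    simp only [res]
    split_ifs with h1 h2
    · simp
    · simp
    · exact ih m (c :: cur)

theorem go_eq_res (fuel : Nat) (l : List Char) (m : Nat) (cur : List Char)
    (acc : List (List Char)) (h : l.length < fuel) :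
    PySem.Chars.splitOnMax.go ['_'] fuel m l cur acc = acc.reverse ++ res m l cur := by
  induction fuel generalizing l m cur acc with
  | zero => omega
  | succ fuel ih =>
    cases l with
    | nil => simp [PySem.Chars.splitOnMax.go, res]
    | cons c rest =>
      by_cases hm : m = 0
      · subst hm
        simp [PySem.Chars.splitOnMax.go, res]
      · by_cases hc : c = '_'
        · subst hc
          have hpre : List.isPrefixOf ['_'] ('_' :: rest) = true := by
            simp [List.isPrefixOf]
          simp only [PySem.Chars.splitOnMax.go, if_neg hm, hpre, if_pos]
          rw [show List.drop (['_'] : List Char).length ('_' :: rest) = rest from rfl,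
              ih rest (m - 1) [] (cur.reverse :: acc) (by simp at h ⊢; omega)]
          simp [res, hm]
        · have hpre : List.isPrefixOf ['_'] (c :: rest) = false := by
            simp only [List.isPrefixOf, Bool.and_eq_false_iff, beq_eq_false_iff_ne, ne_eq]
            exact Or.inl fun h => hc h.symm
          simp only [PySem.Chars.splitOnMax.go, if_neg hm, hpre]
          rw [ih rest m (c :: cur) acc (by simp at h ⊢; omega)]
          simp [res, hm, hc]

theorem splitOnMax_eq_res (l : List Char) :
    PySem.Chars.splitOnMax l ['_'] 3 = res 3 l [] := by
  have : ¬ ((3 : Int) < 0) := by norm_num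
  simp only [PySem.Chars.splitOnMax, if_neg this]
  rw [go_eq_res (l.length + 1) l _ [] [] (by omega)]
  rfl

-- core lemma: join of the first m tokens equals "cut before the m-th underscore, else all"
theorem join_res (l : List Char) (m : Nat) (pre : List Char) (hm : 1 ≤ m) :
    PySem.Chars.join ['_'] ((res m l pre).take m) =
      pre.reverse ++
        (if m ≤ (upos l).length then l.take ((upos l).getD (m - 1) 0) else l) := by
  induction l generalizing m pre with
  | nil =>
    simp only [res, upos, List.length_nil]
    rw [List.take_of_length_le (by simpa using hm), PySem.Chars.join_singleton,
        if_neg (by omega)]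
    simp
  | cons c rest ih =>
    have hm0 : m ≠ 0 := by omega
    obtain ⟨k, rfl⟩ : ∃ k, m = k + 1 := ⟨m - 1, by omega⟩
    by_cases hc : c = '_'
    · subst hc
      simp only [res, upos, reduceIte, if_neg hm0, Nat.add_sub_cancel]
      rw [List.take_succ_cons]
      cases k with
      | zero =>
        rw [List.take_zero, PySem.Chars.join_singleton]
        simp
      | succ k' =>
        obtain ⟨q, qs, hq⟩ : ∃ q qs, (res (k' + 1) rest []).take (k' + 1) = q :: qs := by
          cases hres : res (k' + 1) rest [] with
          | nil => exact absurd hres (res_ne_nil _ _ _)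
          | cons q qs => exact ⟨q, qs.take k', by rw [List.take_succ_cons]⟩
        rw [hq, PySem.Chars.join_cons_cons, ← hq, ih (k' + 1) [] (by omega)]
        simp only [List.reverse_nil, List.nil_append, List.length_cons, List.length_map,
          Nat.add_sub_cancel, List.getD_cons_succ]
        by_cases hlen : k' + 1 ≤ (upos rest).length
        · rw [if_pos hlen,
              if_pos (by omega : k' + 1 + 1 ≤ (upos rest).length + 1)]
          have hmap : ((upos rest).map (· + 1)).getD k' 0 = (upos rest).getD k' 0 + 1 := by
            rw [List.getD_eq_getElem?_getD, List.getD_eq_getElem?_getD, List.getElem?_map]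
            have hk : k' < (upos rest).length := by omega
            simp [List.getElem?_eq_getElem hk]
          rw [hmap, List.take_succ_cons]
          simp
        · rw [if_neg hlen,
              if_neg (by omega : ¬ (k' + 1 + 1 ≤ (upos rest).length + 1))]
          simp
    · simp only [res, upos, if_neg hm0, if_neg hc]
      rw [ih (k + 1) (c :: pre) (by omega)]
      simp only [List.reverse_cons, List.length_map, Nat.add_sub_cancel]
      by_cases hlen : k + 1 ≤ (upos rest).length
      · rw [if_pos hlen, if_pos hlen]
        have hmap : ((upos rest).map (· + 1)).getD k 0 = (upos rest).getD k 0 + 1 := by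
          rw [List.getD_eq_getElem?_getD, List.getD_eq_getElem?_getD, List.getElem?_map]
          have hk : k < (upos rest).length := by omega
          simp [List.getElem?_eq_getElem hk]
        rw [hmap, List.take_succ_cons]
        simp
      · rw [if_neg hlen, if_neg hlen]
        simp

-- A's core equals B's core, for any base string
theorem core_eq (b : String) :
    (if 3 ≤ ((((PySem.List.enumerate b.toList 0).filter (fun p => p.2 == '_')).map Prod.fst)).length then
        PySem.Str.slice b none
          (some (PySem.List.pyGetD
            (((PySem.List.enumerate b.toList 0).filter (fun p => p.2 == '_')).map Prod.fst) 2 0))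
      else b)
    = (match PySem.Str.splitMax? b "_" 3 with
       | some parts => PySem.Str.join "_" (PySem.List.slice parts none (some 3))
       | none => "") := by
  have hsplit : PySem.Str.splitMax? b "_" 3
      = some ((res 3 b.toList []).map String.ofList) := by
    rw [PySem.Str.splitMax?, show ("_" : String).toList = ['_'] from rfl]
    simp [PySem.Chars.splitMax?, splitOnMax_eq_res]
  rw [hsplit]
  simp only
  rw [show (3 : Int) = ((3 : Nat) : Int) from rfl, PySem.List.slice_to_natCast,
      ← List.map_take, PySem.Str.join,
      show ("_" : String).toList = ['_'] from rfl, List.map_map]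
  rw [show (String.toList ∘ String.ofList) = (id : List Char → List Char) from
        funext fun l => String.toList_ofList, List.map_id]
  rw [join_res b.toList 3 [] (by norm_num)]
  simp only [List.reverse_nil, List.nil_append]
  rw [idx_list, List.length_map, show (3 : Nat) - 1 = 2 from rfl]
  by_cases h : 3 ≤ (upos b.toList).length
  · rw [if_pos h, if_pos h]
    have hg : PySem.List.pyGetD ((upos b.toList).map (fun n : Nat => (n : Int))) 2 0
        = (((upos b.toList).getD 2 0 : Nat) : Int) := by
      rw [show (2 : Int) = ((2 : Nat) : Int) from rfl, PySem.List.pyGetD_natCast,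
          List.getD_eq_getElem?_getD, List.getD_eq_getElem?_getD, List.getElem?_map]
      have h2 : 2 < (upos b.toList).length := by omega
      simp [List.getElem?_eq_getElem h2]
    rw [hg]
    simp only [PySem.Str.slice, PySem.Chars.slice]
    rw [PySem.List.slice_to_natCast]
  · rw [if_neg h, if_neg h]
    exact String.ofList_toList.symm

-- ===== VERDICT (by name: the statement is the Claim_ definition above) =====
theorem extract_top_key_spec : Claim_equal_extract_top_key := by
  intro f _
  show extract_top_key f = extract_top_key_alt f
  unfold extract_top_key extract_top_key_alt
  exact core_eq _
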